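-- pv_equiv track=rewrite | github.com/arbwasisi/CSC110 | infographic.py | check_punc
-- ===== SOURCE A (Python) =====
-- def check_punc(dictionary):
--     '''
--     This function returns the number of words with and without punctuation.
--     dictionary: Word count dictionary
--     '''
--
--     punctuation = [',', '.', '?', '!']
--     punc = 0
--     no_punc = 0
--
--     for word in dictionary.keys():
--         if word[-1] in punctuation:
--             punc += 1
--         else:
--             no_punc += 1
--
--     return punc, no_punc
-- ===== SOURCE B (Python) =====
-- def check_punc(dictionary):
--     '''
--     This function returns the number of words with and without punctuation.
--     dictionary: Word count dictionary
--     '''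
--     lasts = [word[-1] for word in dictionary]
--     punc = 0
--     for p in (',', '.', '?', '!'):
--         punc += lasts.count(p)
--     return punc, len(lasts) - punc
-- ===== Notes on version B (the rewrite author's own statement) =====
-- stated objective: alternative
-- what changed: B first extracts the last character of every key into a list, then loops over the four punctuation marks summing list.count of each mark, deriving no_punc as len - punc, instead of A's single pass with two if/else counters over the words.
import Mathlib
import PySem

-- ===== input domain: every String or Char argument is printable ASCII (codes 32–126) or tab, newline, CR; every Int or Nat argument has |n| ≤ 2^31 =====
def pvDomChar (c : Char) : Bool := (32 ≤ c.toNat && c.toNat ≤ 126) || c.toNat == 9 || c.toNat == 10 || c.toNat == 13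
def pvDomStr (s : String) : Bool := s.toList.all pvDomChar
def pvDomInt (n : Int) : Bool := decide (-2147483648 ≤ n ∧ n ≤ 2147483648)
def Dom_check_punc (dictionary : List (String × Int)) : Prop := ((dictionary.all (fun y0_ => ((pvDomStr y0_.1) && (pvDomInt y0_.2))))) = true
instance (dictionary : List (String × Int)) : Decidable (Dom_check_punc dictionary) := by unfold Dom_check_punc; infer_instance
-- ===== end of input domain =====

-- B extracts the last chars once, then counts each of the four punctuation marks with list.count and derives no_punc as len - punc (alternative traversal).


-- ===== PORT A =====
-- word[-1] in punctuation (exact on nonempty words; empty words are excluded by Pre_, where Python raises IndexError)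
def pvIsPunc (word : String) : Bool :=
  match PySem.Str.pyGet? word (-1) with
  | some c => c ∈ [',', '.', '?', '!']
  | none => false

-- A iterates dict.keys() (distinct keys, first-occurrence order) with two counters in if/else branches.
def check_punc (dictionary : List (String × Int)) : Int × Int :=
  (PySem.List.dedup (dictionary.map Prod.fst)).foldl
    (fun (st : Int × Int) word =>
      if pvIsPunc word then (st.1 + 1, st.2) else (st.1, st.2 + 1))
    (0, 0)

-- ===== PORT B =====
-- word[-1] as a Char; the default ' ' is never used under Pre_ (empty keys are excluded, Python raises there).
def pvLast (word : String) : Char :=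
  (PySem.Str.pyGet? word (-1)).getD ' '

-- B: lasts = [word[-1] for word in dictionary]; for p in (',','.','?','!'): punc += lasts.count(p); return punc, len(lasts) - punc
def check_punc_alt (dictionary : List (String × Int)) : Int × Int :=
  let lasts := (PySem.List.dedup (dictionary.map Prod.fst)).map pvLast
  let punc : Int := [',', '.', '?', '!'].foldl (fun acc p => acc + (lasts.count p : Nat)) 0
  (punc, (lasts.length : Int) - punc)

-- ===== PRECONDITION & SPEC =====
-- Pre_ excludes dictionaries with an empty-string key: there word[-1] raises IndexError in both A and B.
def Pre_check_punc (dictionary : List (String × Int)) : Prop :=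
  ∀ p ∈ dictionary, p.1 ≠ ""
instance (dictionary : List (String × Int)) : Decidable (Pre_check_punc dictionary) := by unfold Pre_check_punc; infer_instance
def pvWitness_check_punc : (List (String × Int)) := [("hi.", 2), ("yes", 1)]
def Spec_check_punc (dictionary : List (String × Int)) (out : Int × Int) : Prop := out = check_punc_alt dictionary
instance (dictionary : List (String × Int)) (out : Int × Int) : Decidable (Spec_check_punc dictionary out) := by unfold Spec_check_punc; infer_instance

-- ===== CLAIM (what is proved, stated in full; the proofs are below) =====
def Claim_equal_check_punc : Prop := ∀ (dictionary : List (String × Int)), Dom_check_punc dictionary → Pre_check_punc dictionary → Spec_check_punc dictionary (check_punc dictionary)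

-- ===== LEMMAS AND PROOFS =====
-- pvIsPunc agrees with membership of the (defaulted) last character: ' ' is not a punctuation mark.
theorem pvIsPunc_eq_mem (w : String) :
    pvIsPunc w = decide (pvLast w ∈ [',', '.', '?', '!']) := by
  unfold pvIsPunc pvLast
  cases PySem.Str.pyGet? w (-1) <;> simp

-- A's two-counter fold equals (punctuated count, rest count).
theorem check_punc_fold_eq (ks : List String) (p q : Int) :
    ks.foldl (fun (st : Int × Int) word =>
      if pvIsPunc word then (st.1 + 1, st.2) else (st.1, st.2 + 1)) (p, q)
    = (p + (ks.countP (fun w => pvIsPunc w) : Nat),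
       q + ((ks.length - ks.countP (fun w => pvIsPunc w) : Nat) : Int)) := by
  induction ks generalizing p q with
  | nil => simp
  | cons w ws ih =>
    have hle := List.countP_le_length (l := ws) (p := fun w => pvIsPunc w)
    by_cases h : pvIsPunc w = true <;>
      simp [List.foldl_cons, h, ih] <;> omega

-- counting membership in the 4-element punctuation list = summing the count of each mark
theorem countP_mem_eq_sum_counts (l : List Char) :
    l.countP (fun c => decide (c ∈ [',', '.', '?', '!']))
      = l.count ',' + l.count '.' + l.count '?' + l.count '!' := by
  induction l with
  | nil => simp
  | cons c cs ih =>
    simp only [List.countP_cons, List.count_cons, ih]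
    by_cases h1 : c = ',' <;> by_cases h2 : c = '.' <;> by_cases h3 : c = '?' <;>
      by_cases h4 : c = '!' <;> simp_all <;> omega

-- ===== VERDICT (by name: the statement is the Claim_ definition above) =====
theorem check_punc_spec : Claim_equal_check_punc := by
  intro dictionary _ _
  unfold Spec_check_punc check_punc check_punc_alt
  set ks := PySem.List.dedup (dictionary.map Prod.fst) with hks
  have hle := List.countP_le_length (l := ks) (p := fun w => pvIsPunc w)
  rw [check_punc_fold_eq]
  have hcnt : ks.countP (fun w => pvIsPunc w)
      = (ks.map pvLast).countP (fun c => decide (c ∈ [',', '.', '?', '!'])) := by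
    rw [List.countP_map]
    exact List.countP_congr (fun w _ => by simp [pvIsPunc_eq_mem w])
  simp only [List.foldl_cons, List.foldl_nil, List.length_map]
  rw [hcnt, countP_mem_eq_sum_counts]
  have hle2 := List.countP_le_length (l := ks.map pvLast)
      (p := fun c => decide (c ∈ [',', '.', '?', '!']))
  rw [countP_mem_eq_sum_counts] at hle2
  simp only [List.length_map] at hle2
  simp only [Prod.mk.injEq]
  refine ⟨?_, ?_⟩ <;> push_cast <;> omega
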